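-- pv_equiv track=rewrite | github.com/981377660LMT/algorithm-study | 22_专题/k个数组/3_三个无序数组选数两个差的绝对值最小.py | solve
-- ===== SOURCE A (Python) =====
-- from bisect import bisect_right
--
-- def solve(a, b, c):
--     def getNearest(nums, target):
--         pos = bisect_right(nums, target)
--         left = nums[pos - 1] if pos > 0 else int(1e20)
--         right = nums[pos] if pos < len(nums) else int(1e20)
--         if abs(target - left) < abs(target - right):
--             return left
--         return right
--
--     a, b, c = sorted(a), sorted(b), sorted(c)
--     res = int(1e20)
--     for i in range(len(b)):
--         cur = b[i]
--         n1, n2 = getNearest(a, cur), getNearest(c, cur)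
--         res = min(res, abs(n1 - cur) + abs(n2 - cur))
--     return res
-- ===== SOURCE B (Python) =====
-- def solve(a, b, c):
--     INF = int(1e20)
--
--     def dist(nums, cur):
--         # nearest-element distance; the sentinel INF plays the role of the
--         # "element" an empty array contributes
--         return min(abs(x - cur) for x in nums + [INF])
--
--     return min([INF] + [dist(a, cur) + dist(c, cur) for cur in b])
-- ===== Notes on version B (the rewrite author's own statement) =====
-- stated objective: simpler
-- what changed: Replaces sort + binary-search (bisect_right) nearest-neighbour lookups and an index loop with a direct min over per-element distances (no sorting, no bisect), expressed as one min over a comprehension.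
import Mathlib
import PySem

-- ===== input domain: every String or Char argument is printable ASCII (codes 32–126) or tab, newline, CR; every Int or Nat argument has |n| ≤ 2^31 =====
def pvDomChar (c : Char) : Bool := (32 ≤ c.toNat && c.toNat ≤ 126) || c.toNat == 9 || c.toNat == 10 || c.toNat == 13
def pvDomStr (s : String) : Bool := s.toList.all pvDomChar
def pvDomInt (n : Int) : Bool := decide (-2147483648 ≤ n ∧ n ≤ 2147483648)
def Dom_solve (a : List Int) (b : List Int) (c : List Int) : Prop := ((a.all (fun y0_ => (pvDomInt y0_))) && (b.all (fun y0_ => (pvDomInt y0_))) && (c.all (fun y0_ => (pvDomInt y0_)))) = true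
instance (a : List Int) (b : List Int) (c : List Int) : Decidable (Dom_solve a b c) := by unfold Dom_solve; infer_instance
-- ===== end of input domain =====

-- B replaces sort + bisect_right nearest-neighbour lookups with a direct min over
-- per-element distances (objective: simpler); A and B agree on the whole domain.

-- ===== PORT A =====
-- getNearest: bisect_right is PySem.List.bisectRight; the indexings nums[pos-1]
-- (guarded by pos > 0) and nums[pos] (guarded by pos < len) are always in range,
-- so List.getD is exact there.
def pvGetNearest (nums : List Int) (target : Int) : Int :=
  let pos := PySem.List.bisectRight nums target
  let left := if pos > 0 then nums.getD (pos - 1) 0 else 100000000000000000000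
  let right := if pos < nums.length then nums.getD pos 0 else 100000000000000000000
  if |target - left| < |target - right| then left else right

def solve (a : List Int) (b : List Int) (c : List Int) : Int :=
  let a2 := PySem.List.sorted a (fun x => x) false
  let b2 := PySem.List.sorted b (fun x => x) false
  let c2 := PySem.List.sorted c (fun x => x) false
  (PySem.List.pyRange 0 (b2.length : Int) 1).foldl
    (fun res i =>
      let cur := PySem.List.pyGetD b2 i 0
      let n1 := pvGetNearest a2 cur
      let n2 := pvGetNearest c2 cur
      min res (|n1 - cur| + |n2 - cur|))
    100000000000000000000

-- ===== PORT B =====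
-- dist: min over the distances of nums + [INF]; the list is nonempty, so
-- Python's min never raises and min? is always `some` (.getD 0 is unreachable).
def pvDist (nums : List Int) (cur : Int) : Int :=
  (PySem.List.min? ((nums ++ [100000000000000000000]).map (fun x => |x - cur|)) (fun d => d)).getD 0

def solve_alt (a : List Int) (b : List Int) (c : List Int) : Int :=
  (PySem.List.min? (((100000000000000000000 : Int) :: b.map (fun cur => pvDist a cur + pvDist c cur))) (fun d => d)).getD 0

-- ===== PRECONDITION & SPEC =====
def Spec_solve (a : List Int) (b : List Int) (c : List Int) (out : Int) : Prop := out = solve_alt a b c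
instance (a : List Int) (b : List Int) (c : List Int) (out : Int) : Decidable (Spec_solve a b c out) := by unfold Spec_solve; infer_instance

-- ===== CLAIM (what is proved, stated in full; the proofs are below) =====
def Claim_equal_solve : Prop := ∀ (a : List Int) (b : List Int) (c : List Int), Dom_solve a b c → Spec_solve a b c (solve a b c)

-- ===== LEMMAS AND PROOFS =====

-- the minimum value of a nonempty list is characterised by membership + lower bound
lemma min?_id_eq_of (l : List Int) (v : Int) (hv : v ∈ l) (hmin : ∀ y ∈ l, v ≤ y) :
    PySem.List.min? l (fun d => d) = some v := by
  have hne : l ≠ [] := by rintro rfl; exact (List.not_mem_nil).elim hv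
  obtain ⟨m, hm⟩ : ∃ m, PySem.List.min? l (fun d => d) = some m := by
    cases h : PySem.List.min? l (fun d => d) with
    | none => exact absurd ((PySem.List.min?_eq_none_iff l _).mp h) hne
    | some m => exact ⟨m, rfl⟩
  have hmem := PySem.List.min?_mem hm
  have hismin := PySem.List.min?_isMin hm
  have : m = v := le_antisymm (hismin v hv) (hmin m hmem)
  simpa [this] using hm

-- fold of `min` is permutation-invariant
lemma foldl_min_perm (l l' : List Int) (h : l.Perm l') (i : Int) :
    l.foldl min i = l'.foldl min i := by
  induction h generalizing i with
  | nil => rfl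
  | cons x _ ih => simp [List.foldl, ih]
  | swap x y _ => simp [List.foldl, min_comm, min_left_comm]
  | trans _ _ ih1 ih2 => rw [ih1, ih2]



-- core: B's brute-force nearest distance equals A's sorted+bisect nearest distance
lemma dist_eq (l : List Int) (cur : Int)
    (hb : ∀ x ∈ l, -2147483648 ≤ x ∧ x ≤ 2147483648)
    (hc : -2147483648 ≤ cur ∧ cur ≤ 2147483648) :
    pvDist l cur = |pvGetNearest (PySem.List.sorted l (fun x => x) false) cur - cur| := by
  set s := PySem.List.sorted l (fun x => x) false with hs
  have hperm : s.Perm l := PySem.List.sorted_perm l (fun x => x) false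
  have hpw : List.Pairwise (fun a b : Int => a ≤ b) s := by
    simpa [hs] using PySem.List.sorted_pairwise l (fun x => x)
  obtain ⟨hp1, hp2, hp3⟩ := PySem.List.bisectRight_spec s cur hpw
  have hbs : ∀ x ∈ s, -2147483648 ≤ x ∧ x ≤ 2147483648 := fun x hx => hb x (hperm.subset hx)
  have hmono : ∀ {p q : Nat} (hpq : p ≤ q) (hq : q < s.length), s[p]'(by omega) ≤ s[q]'hq := by
    intro p q hpq hq
    exact PySem.List.sorted_id_getElem_mono l hpq (by simpa [hs] using hq)
  suffices K : pvGetNearest s cur ∈ l ++ [100000000000000000000] ∧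
      ∀ x ∈ l ++ [100000000000000000000], |pvGetNearest s cur - cur| ≤ |x - cur| by
    unfold pvDist
    rw [min?_id_eq_of _ (|pvGetNearest s cur - cur|)
        (List.mem_map.mpr ⟨_, K.1, rfl⟩)
        (by
          rintro y hy
          obtain ⟨x, hx, rfl⟩ := List.mem_map.mp hy
          exact K.2 x hx)]
    rfl
  set pos := PySem.List.bisectRight s cur with hpos
  have hn : pvGetNearest s cur =
      (if |cur - (if pos > 0 then s.getD (pos-1) 0 else 100000000000000000000)| <
          |cur - (if pos < s.length then s.getD pos 0 else 100000000000000000000)|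
       then (if pos > 0 then s.getD (pos-1) 0 else 100000000000000000000)
       else (if pos < s.length then s.getD pos 0 else 100000000000000000000)) := rfl
  rw [hn]
  rcases Nat.eq_zero_or_pos pos with h0 | hpp
  · rcases Nat.eq_zero_or_pos s.length with hl0 | hlp
    · -- empty list: the nearest "element" is the INF sentinel on both sides
      have hsnil : s = [] := List.length_eq_zero_iff.mp hl0
      have hlnil : l = [] := by
        have h2 := hperm.symm
        rw [hsnil] at h2
        exact h2.eq_nil
      subst hlnil
      simp [h0, hl0]
    · -- pos = 0 on a nonempty list: the answer is s[0]
      have hR : s.getD 0 0 = s[0]'hlp := List.getD_eq_getElem s 0 hlp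
      have hcur0 : cur < s[0]'hlp := hp3 0 hlp (by omega)
      have hb0 := hbs (s[0]'hlp) (List.getElem_mem hlp)
      have e1 : (if pos > 0 then s.getD (pos-1) 0 else (100000000000000000000 : Int)) =
          100000000000000000000 := if_neg (by omega)
      have e2 : (if pos < s.length then s.getD pos 0 else (100000000000000000000 : Int)) =
          s[0]'hlp := by rw [if_pos (by omega : pos < s.length), h0, hR]
      rw [e1, e2]
      have hcond : ¬ (|cur - (100000000000000000000 : Int)| < |cur - s[0]'hlp|) := by
        rw [abs_of_nonpos (by omega : cur - (100000000000000000000 : Int) ≤ 0),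
            abs_of_nonpos (by omega : cur - s[0]'hlp ≤ 0)]
        omega
      rw [if_neg hcond]
      refine ⟨List.mem_append_left _ (hperm.subset (List.getElem_mem hlp)), ?_⟩
      intro x hx
      rcases List.mem_append.mp hx with hx | hx
      · obtain ⟨j, hj, rfl⟩ := List.getElem_of_mem (hperm.mem_iff.mpr hx)
        have h0j : s[0]'hlp ≤ s[j]'hj := hmono (Nat.zero_le j) hj
        have hjc : cur < s[j]'hj := hp3 j hj (by omega)
        rw [abs_of_nonneg (by omega : (0:Int) ≤ s[0]'hlp - cur),
            abs_of_nonneg (by omega : (0:Int) ≤ s[j]'hj - cur)]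
        omega
      · simp only [List.mem_singleton] at hx
        subst hx
        rw [abs_of_nonneg (by omega : (0:Int) ≤ s[0]'hlp - cur),
            abs_of_nonneg (by omega : (0:Int) ≤ (100000000000000000000 : Int) - cur)]
        omega
  · have hL : s.getD (pos - 1) 0 = s[pos-1]'(by omega) := List.getD_eq_getElem s 0 (n := pos - 1) (by omega)
    have hLc : s[pos-1]'(by omega) ≤ cur := hp2 (pos-1) (by omega) (by omega)
    have hbL := hbs (s[pos-1]'(by omega)) (List.getElem_mem (l := s) (n := pos - 1) (by omega))
    have e1 : (if pos > 0 then s.getD (pos-1) 0 else (100000000000000000000 : Int)) =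
        s[pos-1]'(by omega) := by rw [if_pos hpp, hL]
    rcases Nat.lt_or_ge pos s.length with hplen | hplen
    · -- 0 < pos < len: both neighbours are real elements
      have hR : s.getD pos 0 = s[pos]'hplen := List.getD_eq_getElem s 0 (n := pos) hplen
      have hRc : cur < s[pos]'hplen := hp3 pos hplen (by omega)
      have hbR := hbs (s[pos]'hplen) (List.getElem_mem hplen)
      have e2 : (if pos < s.length then s.getD pos 0 else (100000000000000000000 : Int)) =
          s[pos]'hplen := by rw [if_pos hplen, hR]
      rw [e1, e2]
      have habsL : |cur - s[pos-1]'(by omega)| = cur - s[pos-1]'(by omega) :=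
        abs_of_nonneg (by omega)
      have habsR : |cur - s[pos]'hplen| = s[pos]'hplen - cur := by
        rw [abs_sub_comm]
        exact abs_of_nonneg (by omega)
      -- in both branches the chosen distance is ≤ both candidate distances
      have key : ∀ n : Int, n = s[pos-1]'(by omega) ∨ n = s[pos]'hplen →
          |n - cur| ≤ cur - s[pos-1]'(by omega) → |n - cur| ≤ s[pos]'hplen - cur →
          n ∈ l ++ [100000000000000000000] ∧
            ∀ x ∈ l ++ [100000000000000000000], |n - cur| ≤ |x - cur| := by
        rintro n hmem hle1 hle2
        constructor
        · rcases hmem with rfl | rfl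
          · exact List.mem_append_left _ (hperm.subset (List.getElem_mem (l := s) (n := pos - 1) (by omega)))
          · exact List.mem_append_left _ (hperm.subset (List.getElem_mem hplen))
        · intro x hx
          rcases List.mem_append.mp hx with hx | hx
          · obtain ⟨j, hj, rfl⟩ := List.getElem_of_mem (hperm.mem_iff.mpr hx)
            rcases Nat.lt_or_ge j pos with hjp | hjp
            · have hjL : s[j]'hj ≤ s[pos-1]'(by omega) := hmono (by omega) (by omega)
              have hjc : s[j]'hj ≤ cur := hp2 j hj hjp
              rw [abs_of_nonpos (by omega : s[j]'hj - cur ≤ 0)]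
              omega
            · have hjR : s[pos]'hplen ≤ s[j]'hj := hmono (by omega) hj
              have hjc : cur < s[j]'hj := hp3 j hj hjp
              rw [abs_of_nonneg (by omega : (0:Int) ≤ s[j]'hj - cur)]
              omega
          · simp only [List.mem_singleton] at hx
            subst hx
            have hbnd := hbL
            rw [abs_of_nonneg (by omega : (0:Int) ≤ (100000000000000000000 : Int) - cur)]
            omega
      by_cases hcond : |cur - s[pos-1]'(by omega)| < |cur - s[pos]'hplen|
      · rw [if_pos hcond]
        rw [habsL, habsR] at hcond
        refine key _ (Or.inl rfl) ?_ ?_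
        · rw [abs_of_nonpos (by omega : s[pos-1]'(by omega) - cur ≤ 0)]
          omega
        · rw [abs_of_nonpos (by omega : s[pos-1]'(by omega) - cur ≤ 0)]
          omega
      · rw [if_neg hcond]
        rw [habsL, habsR] at hcond
        refine key _ (Or.inr rfl) ?_ ?_
        · rw [abs_of_nonneg (by omega : (0:Int) ≤ s[pos]'hplen - cur)]
          omega
        · rw [abs_of_nonneg (by omega : (0:Int) ≤ s[pos]'hplen - cur)]
    · -- pos = len: only the left neighbour is real, INF is farther
      have e2 : (if pos < s.length then s.getD pos 0 else (100000000000000000000 : Int)) =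
          100000000000000000000 := if_neg (by omega)
      rw [e1, e2]
      have hcond : |cur - s[pos-1]'(by omega)| < |cur - (100000000000000000000 : Int)| := by
        rw [abs_of_nonneg (by omega : (0:Int) ≤ cur - s[pos-1]'(by omega)),
            abs_of_nonpos (by omega : cur - (100000000000000000000 : Int) ≤ 0)]
        omega
      rw [if_pos hcond]
      refine ⟨List.mem_append_left _ (hperm.subset (List.getElem_mem (l := s) (n := pos - 1) (by omega))), ?_⟩
      intro x hx
      rcases List.mem_append.mp hx with hx | hx
      · obtain ⟨j, hj, rfl⟩ := List.getElem_of_mem (hperm.mem_iff.mpr hx)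
        have hjL : s[j]'hj ≤ s[pos-1]'(by omega) := hmono (by omega) (by omega)
        have hjc : s[j]'hj ≤ cur := hp2 j hj (by omega)
        rw [abs_of_nonpos (by omega : s[pos-1]'(by omega) - cur ≤ 0),
            abs_of_nonpos (by omega : s[j]'hj - cur ≤ 0)]
        omega
      · simp only [List.mem_singleton] at hx
        subst hx
        rw [abs_of_nonpos (by omega : s[pos-1]'(by omega) - cur ≤ 0),
            abs_of_nonneg (by omega : (0:Int) ≤ (100000000000000000000 : Int) - cur)]
        omega

theorem solve_spec_aux (a b c : List Int) (h : Dom_solve a b c) :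
    solve a b c = solve_alt a b c := by
  unfold Dom_solve at h
  simp only [Bool.and_eq_true, List.all_eq_true, pvDomInt, decide_eq_true_eq] at h
  obtain ⟨⟨hA, hB⟩, hC⟩ := h
  unfold solve solve_alt
  simp only []
  rw [PySem.List.foldl_pyRange_zero_pyGetD' (PySem.List.sorted b (fun x => x) false) 0
      (fun res cur => min res
        (|pvGetNearest (PySem.List.sorted a (fun x => x) false) cur - cur| +
         |pvGetNearest (PySem.List.sorted c (fun x => x) false) cur - cur|))
      100000000000000000000]
  rw [PySem.List.foldl_congr_mem _ _
      (fun res cur => min res (pvDist a cur + pvDist c cur)) _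
      (by
        intro acc x hx
        have hxb : -2147483648 ≤ x ∧ x ≤ 2147483648 :=
          hB x ((PySem.List.mem_sorted b (fun y => y) false x).mp hx)
        simp only [dist_eq a x hA hxb, dist_eq c x hC hxb])]
  rw [PySem.List.min?_id_cons, Option.getD_some]
  rw [← List.foldl_map (f := fun cur => pvDist a cur + pvDist c cur) (g := min)]
  exact foldl_min_perm _ _ (((PySem.List.sorted_perm b (fun x => x) false)).map _) _

-- ===== VERDICT (by name: the statement is the Claim_ definition above) =====
theorem solve_spec : Claim_equal_solve := by
  intro a b c h
  unfold Spec_solve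
  exact solve_spec_aux a b c h
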